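-- pv_equiv track=rewrite | github.com/charityscience/csh-sms | modules/upload_contacts_from_file.py | check_all_headers
-- ===== SOURCE A (Python) =====
-- def matching_permutation(row, header):
--     permutations = [header, header + " ", " " + header + " ",
--                     header + ",", header + ".", "The " + header,
--                     header[0:-1], header[1:]]
--
--     for perm in permutations:
--         if row.get(perm):
--             return perm
--         elif row.get(perm.capitalize()):
--             return perm.capitalize()
--         elif row.get(perm.title()):
--             return perm.title()
--         elif row.get(perm.upper()):
--             return perm.upper()
--         elif row.get(perm.lower()):
--             return perm.lower()
--
--     return None
--
-- def check_all_headers(row, headers):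
--     for header in headers:
--         if row.get(header):
--             return row.get(header)
--
--     for header in headers:
--         matching_key = matching_permutation(row=row, header=header)
--         if matching_key:
--             return row.get(matching_key)
--
--     return None
-- ===== SOURCE B (Python) =====
-- def _rank(key, perms):
--     for pi, perm in enumerate(perms):
--         for vi, variant in enumerate((perm, perm.capitalize(), perm.title(),
--                                       perm.upper(), perm.lower())):
--             if variant == key:
--                 return (pi, vi)
--     return None
--
--
-- def check_all_headers(row, headers):
--     for header in headers:
--         if row.get(header):
--             return row.get(header)
--     for header in headers:
--         perms = (header, header + " ", " " + header + " ", header + ",",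
--                  header + ".", "The " + header, header[0:-1], header[1:])
--         best = None
--         for key, value in row.items():
--             if key and value:
--                 rank = _rank(key, perms)
--                 if rank is not None and (best is None or rank < best[0]):
--                     best = (rank, value)
--         if best is not None:
--             return best[1]
--     return None
-- ===== Notes on version B (the rewrite author's own statement) =====
-- stated objective: alternative
-- what changed: B reverses the matching direction: instead of probing the dict with up to 40 generated candidate keys per header, it scans the row's items once per header, assigns each non-blank truthy key its (permutation, case-variant) rank if it is a permutation variant, and returns the value of the lowest-ranked key; the matching_permutation helper and its elif chain disappear.
import Mathlib
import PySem

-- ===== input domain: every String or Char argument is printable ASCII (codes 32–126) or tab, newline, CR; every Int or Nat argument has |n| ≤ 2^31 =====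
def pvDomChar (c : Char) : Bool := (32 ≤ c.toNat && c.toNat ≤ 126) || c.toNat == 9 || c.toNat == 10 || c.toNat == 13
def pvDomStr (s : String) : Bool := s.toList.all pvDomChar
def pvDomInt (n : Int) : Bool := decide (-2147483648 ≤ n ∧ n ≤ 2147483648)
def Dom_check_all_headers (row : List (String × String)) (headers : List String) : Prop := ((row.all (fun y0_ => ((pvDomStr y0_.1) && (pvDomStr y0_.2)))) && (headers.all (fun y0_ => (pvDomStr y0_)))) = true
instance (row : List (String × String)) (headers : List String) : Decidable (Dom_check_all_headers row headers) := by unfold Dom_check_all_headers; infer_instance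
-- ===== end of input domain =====

-- B reverses the matching direction: instead of probing the dict with each candidate key,
-- it scans the row's items once per header and scores each non-blank key by the lexicographic
-- (permutation, case-variant) rank it would have, returning the value of the best-ranked key.

-- Shared Python-primitive helpers (row.get, truthiness of an Option String,
-- str.capitalize and str.title ported by hand, exact on the ASCII domain).
def pvGet (row : List (String × String)) (k : String) : Option String := List.lookup k row

def pvTruthy : Option String → Bool
  | none => false
  | some v => v ≠ ""

-- str.capitalize: first char uppercased, rest lowercased (exact on ASCII)
def pvCapitalize (s : String) : String :=
  match s.toList with
  | [] => ""
  | c :: cs => String.ofList (PySem.Chars.upperChar c :: cs.map PySem.Chars.lowerChar)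

-- str.title: an alphabetic char is uppercased after a non-alphabetic (or at the start),
-- lowercased after an alphabetic; others unchanged (exact on ASCII)
def pvTitleGo (prevAlpha : Bool) : List Char → List Char
  | [] => []
  | c :: cs =>
      (if PySem.Chars.isalpha c then
        (if prevAlpha then PySem.Chars.lowerChar c else PySem.Chars.upperChar c)
      else c) :: pvTitleGo (PySem.Chars.isalpha c) cs

def pvTitle (s : String) : String := String.ofList (pvTitleGo false s.toList)

-- ===== PORT A =====
-- the elif chain of matching_permutation, looping over the permutation list
def mpGo (row : List (String × String)) : List String → Option String
  | [] => none
  | perm :: rest =>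
      if pvTruthy (pvGet row perm) then some perm
      else if pvTruthy (pvGet row (pvCapitalize perm)) then some (pvCapitalize perm)
      else if pvTruthy (pvGet row (pvTitle perm)) then some (pvTitle perm)
      else if pvTruthy (pvGet row (PySem.Str.upper perm)) then some (PySem.Str.upper perm)
      else if pvTruthy (pvGet row (PySem.Str.lower perm)) then some (PySem.Str.lower perm)
      else mpGo row rest

def matching_permutation (row : List (String × String)) (header : String) : Option String :=
  mpGo row [header, header ++ " ", " " ++ header ++ " ",
            header ++ ",", header ++ ".", "The " ++ header,
            PySem.Str.slice header (some 0) (some (-1)), PySem.Str.slice header (some 1) none]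

def chaLoop1 (row : List (String × String)) : List String → Option String
  | [] => none
  | h :: rest => if pvTruthy (pvGet row h) then pvGet row h else chaLoop1 row rest

def chaLoop2 (row : List (String × String)) : List String → Option String
  | [] => none
  | h :: rest =>
      match matching_permutation row h with
      | some k => if k ≠ "" then pvGet row k else chaLoop2 row rest
      | none => chaLoop2 row rest

def check_all_headers (row : List (String × String)) (headers : List String) : Option String :=
  match chaLoop1 row headers with
  | some v => some v
  | none => chaLoop2 row headers

-- ===== PORT B =====
-- the 5-tuple of case variants of a permutation (the inner enumerate of _rank)
def pvVariants (p : String) : List String :=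
  [p, pvCapitalize p, pvTitle p, PySem.Str.upper p, PySem.Str.lower p]

-- the 8 permutations of a header (the tuple built per header in Source B)
def pvPerms (h : String) : List String :=
  [h, h ++ " ", " " ++ h ++ " ", h ++ ",", h ++ ".", "The " ++ h,
   PySem.Str.slice h (some 0) (some (-1)), PySem.Str.slice h (some 1) none]

-- _rank: the nested enumerate loops with early return, index counters carried explicitly
def rankInner (k : String) (vi : Nat) : List String → Option Nat
  | [] => none
  | c :: cs => if c == k then some vi else rankInner k (vi + 1) cs

def rankOuter (k : String) (pi : Nat) : List String → Option (Nat × Nat)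
  | [] => none
  | p :: ps =>
      match rankInner k 0 (pvVariants p) with
      | some vi => some (pi, vi)
      | none => rankOuter k (pi + 1) ps

def pvRank (k : String) (perms : List String) : Option (Nat × Nat) := rankOuter k 0 perms

-- Python tuple comparison (pi, vi) < (pi', vi')
def pvLexLt (a b : Nat × Nat) : Bool := decide (a.1 < b.1) || (a.1 == b.1 && decide (a.2 < b.2))

-- one step of Source B's row scan: keep the best (lowest-ranked) non-blank truthy key so far
def altStep (perms : List String) (best : Option ((Nat × Nat) × String)) (kv : String × String) :
    Option ((Nat × Nat) × String) :=
  if kv.1 ≠ "" ∧ kv.2 ≠ "" then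
    match pvRank kv.1 perms with
    | none => best
    | some r =>
        match best with
        | none => some (r, kv.2)
        | some b => if pvLexLt r b.1 then some (r, kv.2) else best
  else best

def altBest (row : List (String × String)) (perms : List String) :
    Option ((Nat × Nat) × String) :=
  row.foldl (altStep perms) none

def altLoop1 (row : List (String × String)) : List String → Option String
  | [] => none
  | h :: rest => if pvTruthy (pvGet row h) then pvGet row h else altLoop1 row rest

def altLoop2 (row : List (String × String)) : List String → Option String
  | [] => none
  | h :: rest =>
      match altBest row (pvPerms h) with
      | some b => some b.2
      | none => altLoop2 row rest

def check_all_headers_alt (row : List (String × String)) (headers : List String) : Option String :=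
  match altLoop1 row headers with
  | some v => some v
  | none => altLoop2 row headers

-- ===== PRECONDITION & SPEC =====
-- Pre_ excludes association lists with duplicate keys, which the Python dict argument `row`
-- can never contain (a dict's keys are unique); on such lists lookup-by-first-match vs a
-- full scan of the pairs is an accident of the encoding.
def Pre_check_all_headers (row : List (String × String)) (headers : List String) : Prop :=
  (row.map Prod.fst).Nodup
instance (row : List (String × String)) (headers : List String) :
    Decidable (Pre_check_all_headers row headers) := by unfold Pre_check_all_headers; infer_instance

def pvWitness_check_all_headers : (List (String × String)) × List String :=
  ([("Name", "John"), ("Age", "7")], ["name"])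

def Spec_check_all_headers (row : List (String × String)) (headers : List String)
    (out : Option String) : Prop := out = check_all_headers_alt row headers
instance (row : List (String × String)) (headers : List String) (out : Option String) :
    Decidable (Spec_check_all_headers row headers out) := by unfold Spec_check_all_headers; infer_instance

-- ===== CLAIM (what is proved, stated in full; the proofs are below) =====
def Claim_equal_check_all_headers : Prop :=
  ∀ (row : List (String × String)) (headers : List String),
    Dom_check_all_headers row headers → Pre_check_all_headers row headers →
      Spec_check_all_headers row headers (check_all_headers row headers)

-- ===== LEMMAS AND PROOFS =====
-- (everything below is proof-only machinery)

-- first index of a string in a list (the specification both ranks are measured against)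
def firstIdx (k : String) : List String → Option Nat
  | [] => none
  | c :: cs => if c = k then some 0 else (firstIdx k cs).map (· + 1)

theorem firstIdx_lt_length {k : String} {l : List String} {i : Nat}
    (h : firstIdx k l = some i) : i < l.length := by
  induction l generalizing i with
  | nil => simp [firstIdx] at h
  | cons c cs ih =>
      by_cases hc : c = k
      · simp [firstIdx, hc] at h; simp; omega
      · simp [firstIdx, hc] at h
        obtain ⟨j, hj, rfl⟩ := h
        have := ih hj; simp; omega

theorem firstIdx_getElem? {k : String} {l : List String} {i : Nat}
    (h : firstIdx k l = some i) : l[i]? = some k := by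
  induction l generalizing i with
  | nil => simp [firstIdx] at h
  | cons c cs ih =>
      by_cases hc : c = k
      · simp [firstIdx, hc] at h; simp [← h, hc]
      · simp [firstIdx, hc] at h
        obtain ⟨j, hj, rfl⟩ := h
        simpa using ih hj

theorem firstIdx_eq_none_iff {k : String} {l : List String} :
    firstIdx k l = none ↔ k ∉ l := by
  induction l with
  | nil => simp [firstIdx]
  | cons c cs ih =>
      by_cases hc : c = k
      · simp [firstIdx, hc]
      · simp [firstIdx, hc, ih, Ne.symm hc]

theorem firstIdx_append {k : String} (l1 l2 : List String) :
    firstIdx k (l1 ++ l2) =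
      match firstIdx k l1 with
      | some i => some i
      | none => (firstIdx k l2).map (· + l1.length) := by
  induction l1 with
  | nil => simp [firstIdx]
  | cons c cs ih =>
      by_cases hc : c = k
      · simp [firstIdx, hc]
      · simp only [List.cons_append, firstIdx, hc, if_false, ih]
        cases hfi : firstIdx k cs with
        | some i => simp
        | none =>
            cases firstIdx k l2 with
            | none => simp
            | some j => simp; omega

theorem firstIdx_of_notmem {k : String} {pre : List String} (post : List String)
    (h : k ∉ pre) : firstIdx k (pre ++ k :: post) = some pre.length := by
  rw [firstIdx_append]
  rw [firstIdx_eq_none_iff.mpr h]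
  simp [firstIdx]

-- Source B's _rank computes the first index in the flattened candidate list, split base 5
theorem rankInner_eq (k : String) (l : List String) :
    ∀ vi, rankInner k vi l = (firstIdx k l).map (· + vi) := by
  induction l with
  | nil => intro vi; simp [rankInner, firstIdx]
  | cons c cs ih =>
      intro vi
      by_cases hc : c = k
      · simp [rankInner, firstIdx, hc]
      · simp only [rankInner, firstIdx, hc, beq_iff_eq, if_false, ih (vi + 1)]
        cases firstIdx k cs with
        | none => simp
        | some j => simp; omega

theorem rankOuter_eq (k : String) (perms : List String) :
    ∀ pi, rankOuter k pi perms =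
      (firstIdx k (perms.flatMap pvVariants)).map (fun n => (pi + n / 5, n % 5)) := by
  induction perms with
  | nil => intro pi; simp [rankOuter, firstIdx]
  | cons p ps ih =>
      intro pi
      have hlen : (pvVariants p).length = 5 := rfl
      simp only [rankOuter, rankInner_eq, List.flatMap_cons, firstIdx_append]
      cases hfi : firstIdx k (pvVariants p) with
      | some i =>
          have hi : i < 5 := hlen ▸ firstIdx_lt_length hfi
          simp only [Option.map_some, Option.some.injEq, Prod.mk.injEq]
          omega
      | none =>
          simp only [Option.map_none, ih (pi + 1), hlen]
          cases firstIdx k (ps.flatMap pvVariants) with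
          | none => simp
          | some j =>
              simp only [Option.map_some, Option.some.injEq, Prod.mk.injEq]
              omega

theorem pvRank_eq (k : String) (perms : List String) :
    pvRank k perms = (firstIdx k (perms.flatMap pvVariants)).map (fun n => (n / 5, n % 5)) := by
  unfold pvRank
  rw [rankOuter_eq]
  cases firstIdx k (perms.flatMap pvVariants) <;> simp

theorem pvLexLt_div_mod (m n : Nat) :
    pvLexLt (m / 5, m % 5) (n / 5, n % 5) = decide (m < n) := by
  by_cases h : m < n
  · simp only [h, decide_true, pvLexLt, Bool.or_eq_true, Bool.and_eq_true,
      decide_eq_true_eq, beq_iff_eq]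
    omega
  · simp only [h, decide_false, pvLexLt, Bool.or_eq_false_iff, Bool.and_eq_false_iff,
      decide_eq_false_iff_not, beq_eq_false_iff_ne, ne_eq]
    omega

theorem pvLexLt_asymm {a b : Nat × Nat} (h : pvLexLt a b = true) : pvLexLt b a = false := by
  simp only [pvLexLt, Bool.or_eq_true, Bool.and_eq_true, decide_eq_true_eq, beq_iff_eq] at h
  simp only [pvLexLt, Bool.or_eq_false_iff, Bool.and_eq_false_iff, decide_eq_false_iff_not,
    beq_eq_false_iff_ne, ne_eq]
  omega

-- A's elif chain over a permutation list computes the first truthy key of the flat candidate list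
theorem mpGo_eq_find (row : List (String × String)) (perms : List String) :
    mpGo row perms =
      (perms.flatMap pvVariants).find? (fun c => pvTruthy (pvGet row c)) := by
  induction perms with
  | nil => rfl
  | cons p rest ih =>
      simp only [mpGo, pvVariants, List.flatMap_cons, List.find?_append, List.find?]
      by_cases h1 : pvTruthy (pvGet row p) = true <;>
        by_cases h2 : pvTruthy (pvGet row (pvCapitalize p)) = true <;>
        by_cases h3 : pvTruthy (pvGet row (pvTitle p)) = true <;>
        by_cases h4 : pvTruthy (pvGet row (PySem.Str.upper p)) = true <;>
        by_cases h5 : pvTruthy (pvGet row (PySem.Str.lower p)) = true <;>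
      simp [h1, h2, h3, h4, h5, ih, pvVariants]

theorem matching_permutation_eq_find (row : List (String × String)) (h : String) :
    matching_permutation row h =
      ((pvPerms h).flatMap pvVariants).find? (fun c => pvTruthy (pvGet row c)) := by
  unfold matching_permutation pvPerms
  exact mpGo_eq_find row _

-- lookup facts
theorem mem_of_pvGet {row : List (String × String)} {k v : String}
    (h : pvGet row k = some v) : (k, v) ∈ row := by
  induction row with
  | nil => simp [pvGet] at h
  | cons kv rest ih =>
      obtain ⟨k', v'⟩ := kv
      cases hbe : (k == k') with
      | true =>
          have hk : k = k' := by simpa using hbe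
          simp only [pvGet, List.lookup, hbe] at h
          simp only [Option.some.injEq] at h
          simp [hk, ← h]
      | false =>
          simp only [pvGet, List.lookup, hbe] at h
          exact List.mem_cons_of_mem _ (ih h)

theorem pvGet_of_mem {row : List (String × String)} {k v : String}
    (hnd : (row.map Prod.fst).Nodup) (h : (k, v) ∈ row) : pvGet row k = some v := by
  induction row with
  | nil => simp at h
  | cons kv rest ih =>
      obtain ⟨k', v'⟩ := kv
      simp only [List.map_cons, List.nodup_cons] at hnd
      rcases List.mem_cons.mp h with heq | hmem
      · obtain ⟨rfl, rfl⟩ := Prod.mk.injEq .. ▸ heq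
        simp [pvGet, List.lookup]
      · have hk : k ≠ k' := by
          rintro rfl
          exact hnd.1 (List.mem_map.mpr ⟨(k, v), hmem, rfl⟩)
        have hbe : (k == k') = false := by simpa using hk
        simp only [pvGet, List.lookup, hbe]
        exact ih hnd.2 hmem

theorem pvTruthy_iff {o : Option String} : pvTruthy o = true ↔ ∃ v, o = some v ∧ v ≠ "" := by
  cases o <;> simp [pvTruthy]

-- invariant and "skip or strictly worse" condition for Source B's row scan
def pvInv (r : Nat × Nat) (b : Option ((Nat × Nat) × String)) : Prop :=
  b = none ∨ ∃ rb vb, b = some (rb, vb) ∧ pvLexLt r rb = true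

def pvG (perms : List String) (r : Nat × Nat) (kv : String × String) : Prop :=
  kv.1 = "" ∨ kv.2 = "" ∨ pvRank kv.1 perms = none ∨
    ∃ r', pvRank kv.1 perms = some r' ∧ pvLexLt r r' = true

theorem foldl_skip (perms : List String) (l : List (String × String))
    (h : ∀ kv ∈ l, kv.1 = "" ∨ kv.2 = "" ∨ pvRank kv.1 perms = none) :
    ∀ b, List.foldl (altStep perms) b l = b := by
  induction l with
  | nil => intro b; rfl
  | cons kv rest ih =>
      intro b
      have hkv := h kv (List.mem_cons_self ..)
      have hstep : altStep perms b kv = b := by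
        unfold altStep
        rcases hkv with h1 | h1 | h1
        · rw [if_neg]; simp [h1]
        · rw [if_neg]; simp [h1]
        · by_cases hg : kv.1 ≠ "" ∧ kv.2 ≠ ""
          · rw [if_pos hg, h1]
          · rw [if_neg hg]
      simp only [List.foldl_cons, hstep]
      exact ih (fun x hx => h x (List.mem_cons_of_mem _ hx)) b

theorem foldl_inv (perms : List String) (r : Nat × Nat) (l : List (String × String))
    (h : ∀ kv ∈ l, pvG perms r kv) :
    ∀ b, pvInv r b → pvInv r (List.foldl (altStep perms) b l) := by
  induction l with
  | nil => intro b hb; exact hb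
  | cons kv rest ih =>
      intro b hb
      have hkv := h kv (List.mem_cons_self ..)
      have hstep : pvInv r (altStep perms b kv) := by
        unfold altStep
        by_cases hg : kv.1 ≠ "" ∧ kv.2 ≠ ""
        · rw [if_pos hg]
          rcases hkv with h1 | h1 | h1 | ⟨r', hr', hlt⟩
          · exact absurd h1 hg.1
          · exact absurd h1 hg.2
          · rw [h1]; exact hb
          · rw [hr']
            rcases hb with rfl | ⟨rb, vb, rfl, hltb⟩
            · exact Or.inr ⟨r', kv.2, rfl, hlt⟩
            · by_cases hcmp : pvLexLt r' rb = true
              · simp only [hcmp, if_true]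
                exact Or.inr ⟨r', kv.2, rfl, hlt⟩
              · simp only [hcmp, if_false]
                exact Or.inr ⟨rb, vb, rfl, hltb⟩
        · rw [if_neg hg]; exact hb
      simp only [List.foldl_cons]
      exact ih (fun x hx => h x (List.mem_cons_of_mem _ hx)) _ hstep

theorem foldl_keep (perms : List String) (r : Nat × Nat) (v : String)
    (l : List (String × String)) (h : ∀ kv ∈ l, pvG perms r kv) :
    List.foldl (altStep perms) (some (r, v)) l = some (r, v) := by
  induction l with
  | nil => rfl
  | cons kv rest ih =>
      have hkv := h kv (List.mem_cons_self ..)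
      have hstep : altStep perms (some (r, v)) kv = some (r, v) := by
        unfold altStep
        by_cases hg : kv.1 ≠ "" ∧ kv.2 ≠ ""
        · rw [if_pos hg]
          rcases hkv with h1 | h1 | h1 | ⟨r', hr', hlt⟩
          · exact absurd h1 hg.1
          · exact absurd h1 hg.2
          · rw [h1]
          · rw [hr']
            simp [pvLexLt_asymm hlt]
        · rw [if_neg hg]
      simp only [List.foldl_cons, hstep]
      exact ih (fun x hx => h x (List.mem_cons_of_mem _ hx))

theorem altStep_min (perms : List String) {r : Nat × Nat} {c v : String}
    {b : Option ((Nat × Nat) × String)} (hb : pvInv r b)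
    (hc : c ≠ "") (hv : v ≠ "") (hr : pvRank c perms = some r) :
    altStep perms b (c, v) = some (r, v) := by
  unfold altStep
  rw [if_pos ⟨hc, hv⟩]
  simp only [hr]
  rcases hb with rfl | ⟨rb, vb, rfl, hlt⟩
  · rfl
  · simp [hlt]

theorem altBest_min (row : List (String × String)) (perms : List String)
    {r : Nat × Nat} {c v : String} {l1 l2 : List (String × String)}
    (hrow : row = l1 ++ (c, v) :: l2)
    (hG : ∀ kv ∈ l1 ++ l2, pvG perms r kv)
    (hc : c ≠ "") (hv : v ≠ "") (hr : pvRank c perms = some r) :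
    altBest row perms = some (r, v) := by
  subst hrow
  unfold altBest
  rw [List.foldl_append, List.foldl_cons]
  have h1 : pvInv r (List.foldl (altStep perms) none l1) :=
    foldl_inv perms r l1 (fun x hx => hG x (List.mem_append_left _ hx)) none (Or.inl rfl)
  rw [altStep_min perms h1 hc hv hr]
  exact foldl_keep perms r v l2 (fun x hx => hG x (List.mem_append_right _ hx))

-- emptiness structure of the candidate list: every "" candidate comes after every non-"" one
theorem variants_ne_empty {p : String} (hp : p ≠ "") : ∀ x ∈ pvVariants p, x ≠ "" := by
  obtain ⟨c, l, hl⟩ : ∃ c l, p.toList = c :: l := by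
    cases hpl : p.toList with
    | nil => exact absurd (String.toList_eq_nil_iff.mp hpl) hp
    | cons c l => exact ⟨c, l, rfl⟩
  intro x hx
  simp only [pvVariants, List.mem_cons, List.not_mem_nil, or_false] at hx
  rcases hx with rfl | rfl | rfl | rfl | rfl
  · exact hp
  · unfold pvCapitalize
    rw [hl]
    intro h
    have := congrArg String.toList h
    simp at this
  · unfold pvTitle
    rw [hl]
    intro h
    have := congrArg String.toList h
    simp [pvTitleGo] at this
  · intro h
    have := congrArg String.toList h
    rw [PySem.Str.toList_upper] at this
    simp [PySem.Chars.upper, hl] at this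
  · intro h
    have := congrArg String.toList h
    rw [PySem.Str.toList_lower] at this
    simp [PySem.Chars.lower, hl] at this

theorem variants_empty : pvVariants "" = ["", "", "", "", ""] := by decide

-- for h ≠ "", the flat candidate list is (all non-empty) ++ (all empty)
theorem cands_split (h : String) (hne : h ≠ "") :
    ∃ front tail, (pvPerms h).flatMap pvVariants = front ++ tail ∧
      (∀ x ∈ front, x ≠ "") ∧ (∀ x ∈ tail, x = "") := by
  obtain ⟨c, l, hl⟩ : ∃ c l, h.toList = c :: l := by
    cases hpl : h.toList with
    | nil => exact absurd (String.toList_eq_nil_iff.mp hpl) hne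
    | cons c l => exact ⟨c, l, rfl⟩
  have happ : ∀ t : String, h ++ t ≠ "" := by
    intro t hc
    have := congrArg String.toList hc
    simp [String.toList_append, hl] at this
  have happ' : ∀ s : String, s ≠ "" → ∀ t : String, s ++ t ≠ "" := by
    intro s hs t hc
    have := congrArg String.toList hc
    rw [String.toList_append] at this
    exact hs (String.toList_eq_nil_iff.mp (List.append_eq_nil_iff.mp this).1)
  have hsp : (" " : String) ≠ "" := by decide
  have hthe : ("The " : String) ≠ "" := by decide
  cases l with
  | nil =>
      -- |h| = 1: the two slices are "", everything before them non-empty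
      have hs1 : PySem.Str.slice h (some 0) (some (-1)) = "" := by
        rw [← String.toList_eq_nil_iff, PySem.Str.toList_slice,
          PySem.Chars.slice_eq_listSlice, hl]
        simp only [PySem.List.slice_zero_start, PySem.List.slice_to_neg_one]
        rfl
      have hs2 : PySem.Str.slice h (some 1) none = "" := by
        rw [← String.toList_eq_nil_iff, PySem.Str.toList_slice,
          PySem.Chars.slice_eq_listSlice, hl, PySem.List.slice_from_one]
        rfl
      refine ⟨([h, h ++ " ", " " ++ h ++ " ", h ++ ",", h ++ ".",
        "The " ++ h].flatMap pvVariants),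
        pvVariants "" ++ pvVariants "", ?_, ?_, ?_⟩
      · simp only [pvPerms, hs1, hs2]
        simp [List.flatMap_cons, List.flatMap_nil, List.append_assoc]
      · intro x hx
        rw [List.mem_flatMap] at hx
        obtain ⟨p, hp, hxp⟩ := hx
        have hpne : p ≠ "" := by
          simp only [List.mem_cons, List.not_mem_nil, or_false] at hp
          rcases hp with rfl | rfl | rfl | rfl | rfl | rfl
          · exact hne
          · exact happ " "
          · exact happ' _ (happ' " " hsp h) " "
          · exact happ ","
          · exact happ "."
          · exact happ' "The " hthe h
        exact variants_ne_empty hpne x hxp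
      · intro x hx
        rw [variants_empty] at hx
        simpa using hx
  | cons d l' =>
      -- |h| ≥ 2: every candidate is non-empty
      have hs1 : PySem.Str.slice h (some 0) (some (-1)) ≠ "" := by
        rw [Ne, ← String.toList_eq_nil_iff, PySem.Str.toList_slice,
          PySem.Chars.slice_eq_listSlice, hl]
        simp only [PySem.List.slice_zero_start, PySem.List.slice_to_neg_one]
        simp
      have hs2 : PySem.Str.slice h (some 1) none ≠ "" := by
        rw [Ne, ← String.toList_eq_nil_iff, PySem.Str.toList_slice,
          PySem.Chars.slice_eq_listSlice, hl, PySem.List.slice_from_one]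
        simp
      refine ⟨(pvPerms h).flatMap pvVariants, [], by simp, ?_, by simp⟩
      intro x hx
      rw [List.mem_flatMap] at hx
      obtain ⟨p, hp, hxp⟩ := hx
      have hpne : p ≠ "" := by
        simp only [pvPerms, List.mem_cons, List.not_mem_nil, or_false] at hp
        rcases hp with rfl | rfl | rfl | rfl | rfl | rfl | rfl | rfl
        · exact hne
        · exact happ " "
        · exact happ' _ (happ' " " hsp h) " "
        · exact happ ","
        · exact happ "."
        · exact happ' "The " hthe h
        · exact hs1
        · exact hs2
      exact variants_ne_empty hpne x hxp

-- loop 1 of both programs is the same scan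
theorem loop1_eq (row : List (String × String)) (headers : List String) :
    chaLoop1 row headers = altLoop1 row headers := by
  induction headers with
  | nil => rfl
  | cons h rest ih => simp only [chaLoop1, altLoop1, ih]

theorem loop1_none_falsy {row : List (String × String)} {headers : List String}
    (h : chaLoop1 row headers = none) :
    ∀ hd ∈ headers, pvTruthy (pvGet row hd) = false := by
  induction headers with
  | nil => simp
  | cons hd rest ih =>
      intro x hx
      simp only [chaLoop1] at h
      by_cases ht : pvTruthy (pvGet row hd) = true
      · rw [if_pos ht] at h
        rw [h] at ht
        simp [pvTruthy] at ht
      · rw [if_neg ht] at h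
        rcases List.mem_cons.mp hx with rfl | hmem
        · simpa using ht
        · exact ih h x hmem

-- the per-header core: A's first truthy candidate vs B's best-ranked truthy row key
theorem loop2_eq (row : List (String × String)) (hnd : (row.map Prod.fst).Nodup) :
    ∀ headers : List String, (∀ hd ∈ headers, pvTruthy (pvGet row hd) = false) →
      chaLoop2 row headers = altLoop2 row headers := by
  intro headers
  induction headers with
  | nil => intro _; rfl
  | cons h rest ih =>
      intro hfalsy
      have ihh := ih (fun x hx => hfalsy x (List.mem_cons_of_mem _ hx))
      set cands := (pvPerms h).flatMap pvVariants with hcands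
      simp only [chaLoop2, altLoop2, matching_permutation_eq_find, ← hcands]
      cases hfind : cands.find? (fun c => pvTruthy (pvGet row c)) with
      | none =>
          -- no truthy candidate at all: B's scan yields no contribution either
          have hnone : altBest row (pvPerms h) = none := by
            apply foldl_skip
            intro kv hkv
            by_cases h1 : kv.1 = ""
            · exact Or.inl h1
            by_cases h2 : kv.2 = ""
            · exact Or.inr (Or.inl h2)
            refine Or.inr (Or.inr ?_)
            by_contra hr
            obtain ⟨r, hr⟩ := Option.ne_none_iff_exists'.mp hr
            rw [pvRank_eq] at hr
            obtain ⟨i, hi, _⟩ := Option.map_eq_some_iff.mp hr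
            have hmem : kv.1 ∈ cands := List.mem_of_getElem? (firstIdx_getElem? hi)
            have := List.find?_eq_none.mp hfind _ hmem
            rw [pvTruthy_iff] at this
            exact this ⟨kv.2, pvGet_of_mem hnd (by simpa using hkv), h2⟩
          rw [hnone, ihh]
      | some c =>
          obtain ⟨hpc, pre, post, hdecomp, hpre⟩ :=
            List.find?_eq_some_iff_append.mp hfind
          have hprefalse : ∀ x ∈ pre, pvTruthy (pvGet row x) = false := by
            intro x hx
            simpa using hpre x hx
          obtain ⟨v, hgv, hvne⟩ := pvTruthy_iff.mp hpc
          by_cases hce : c = ""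
          · -- A skips the header ('' is falsy as a key); B finds nothing either,
            -- because every non-"" candidate precedes the found "" and is not truthy,
            -- unless h = "", which loop 1 already ruled out
            subst hce
            have hne : h ≠ "" := by
              rintro rfl
              have := hfalsy "" (List.mem_cons_self ..)
              rw [this] at hpc
              exact Bool.false_ne_true hpc
            obtain ⟨front, tail, hsplit, hfront, htail⟩ := cands_split h hne
            rw [← hcands] at hsplit
            have hfrontpre : ∀ x ∈ front, x ∈ pre := by
              have hcomp : pre <+: front ∨ front <+: pre := by
                rcases List.prefix_or_prefix_of_prefix
                  (l₁ := pre) (l₂ := front) (l₃ := cands)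
                  ⟨"" :: post, hdecomp.symm⟩ ⟨tail, hsplit.symm⟩ with hp | hp
                · exact Or.inl hp
                · exact Or.inr hp
              rcases hcomp with ⟨d, hd⟩ | ⟨d, hd⟩
              · -- pre ++ d = front; d must be empty or start with ""
                have : d ++ tail = "" :: post := by
                  have h1 : (pre ++ d) ++ tail = pre ++ "" :: post := by
                    rw [hd, ← hsplit, hdecomp]
                  rwa [List.append_assoc, List.append_cancel_left_eq] at h1
                cases d with
                | nil =>
                    intro x hx
                    rw [← hd] at hx
                    simpa using hx
                | cons y d' =>
                    exfalso
                    have hy : y = "" := by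
                      have := congrArg (fun l => l.head?) this
                      simpa using this
                    have : y ∈ front := by rw [← hd]; simp
                    exact hfront y this (by rw [hy])
              · intro x hx
                rw [← hd]
                exact List.mem_append_left _ hx
            have hnone : altBest row (pvPerms h) = none := by
              apply foldl_skip
              intro kv hkv
              by_cases h1 : kv.1 = ""
              · exact Or.inl h1
              by_cases h2 : kv.2 = ""
              · exact Or.inr (Or.inl h2)
              refine Or.inr (Or.inr ?_)
              by_contra hr
              obtain ⟨r, hr⟩ := Option.ne_none_iff_exists'.mp hr
              rw [pvRank_eq] at hr
              obtain ⟨i, hi, _⟩ := Option.map_eq_some_iff.mp hr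
              have hmem : kv.1 ∈ cands := List.mem_of_getElem? (firstIdx_getElem? hi)
              have hmem' : kv.1 ∈ front ∨ kv.1 ∈ tail := by
                rw [hsplit] at hmem
                exact List.mem_append.mp hmem
              rcases hmem' with hf | ht
              · have := hprefalse _ (hfrontpre _ hf)
                rw [pvTruthy_iff] at hpc
                have htr : pvTruthy (pvGet row kv.1) = true :=
                  pvTruthy_iff.mpr ⟨kv.2, pvGet_of_mem hnd (by simpa using hkv), h2⟩
                rw [this] at htr
                exact Bool.false_ne_true htr
              · exact h1 (htail _ ht)
            simp only [if_neg (by simp : ¬("" ≠ "")), hnone, ihh]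
          · -- A returns row.get(c); B's best-ranked key is exactly c
            have hcpre : c ∉ pre := by
              intro hmem
              have := hprefalse c hmem
              rw [this] at hpc
              exact Bool.false_ne_true hpc
            have hfi : firstIdx c cands = some pre.length := by
              rw [hdecomp]; exact firstIdx_of_notmem post hcpre
            have hrank : pvRank c (pvPerms h) = some (pre.length / 5, pre.length % 5) := by
              rw [pvRank_eq, ← hcands, hfi]; rfl
            have hcv : (c, v) ∈ row := mem_of_pvGet hgv
            obtain ⟨l1, l2, hrow⟩ := List.append_of_mem hcv
            have hkeys : ∀ kv ∈ l1 ++ l2, kv.1 ≠ c := by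
              have hnd' : ((l1 ++ (c, v) :: l2).map Prod.fst).Nodup := hrow ▸ hnd
              rw [List.map_append, List.map_cons] at hnd'
              intro kv hkv hkc
              rcases List.mem_append.mp hkv with hm | hm
              · exact (List.disjoint_of_nodup_append hnd')
                  (List.mem_map.mpr ⟨kv, hm, hkc⟩) (by simp)
              · have := (List.nodup_append.mp hnd').2.1
                rw [List.nodup_cons] at this
                exact this.1 (hkc ▸ List.mem_map.mpr ⟨kv, hm, rfl⟩)
            have hG : ∀ kv ∈ l1 ++ l2, pvG (pvPerms h) (pre.length / 5, pre.length % 5) kv := by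
              intro kv hkv
              by_cases h1 : kv.1 = ""
              · exact Or.inl h1
              by_cases h2 : kv.2 = ""
              · exact Or.inr (Or.inl h2)
              refine Or.inr (Or.inr ?_)
              cases hr : pvRank kv.1 (pvPerms h) with
              | none => exact Or.inl rfl
              | some r =>
                  refine Or.inr ⟨r, rfl, ?_⟩
                  rw [pvRank_eq] at hr
                  obtain ⟨j, hj, hjr⟩ := Option.map_eq_some_iff.mp hr
                  rw [← hcands] at hj
                  have hkvmem : (kv.1, kv.2) ∈ row := by
                    rw [hrow]
                    rcases List.mem_append.mp hkv with hm | hm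
                    · exact List.mem_append_left _ (by simpa using hm)
                    · exact List.mem_append_right _ (List.mem_cons_of_mem _ (by simpa using hm))
                  have htr : pvTruthy (pvGet row kv.1) = true :=
                    pvTruthy_iff.mpr ⟨kv.2, pvGet_of_mem hnd hkvmem, h2⟩
                  have hij : pre.length < j := by
                    rcases Nat.lt_trichotomy j pre.length with hlt | heq | hgt
                    · exfalso
                      have hget : cands[j]? = some kv.1 := firstIdx_getElem? hj
                      rw [hdecomp, List.getElem?_append_left hlt] at hget
                      have : kv.1 ∈ pre := List.mem_of_getElem? hget
                      have := hprefalse _ this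
                      rw [this] at htr
                      exact Bool.false_ne_true htr
                    · exfalso
                      have hget : cands[j]? = some kv.1 := firstIdx_getElem? hj
                      have hgetc : cands[pre.length]? = some c := firstIdx_getElem? hfi
                      rw [heq, hgetc] at hget
                      exact hkeys kv hkv (by simpa using hget.symm)
                    · exact hgt
                  rw [← hjr, pvLexLt_div_mod]
                  simpa using hij
            have hbest : altBest row (pvPerms h) =
                some ((pre.length / 5, pre.length % 5), v) :=
              altBest_min row (pvPerms h) hrow hG hce hvne hrank
            simp only [if_pos hce, hbest, hgv]

-- ===== VERDICT (by name: the statement is the Claim_ definition above) =====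
theorem check_all_headers_spec : Claim_equal_check_all_headers := by
  intro row headers _ hpre
  unfold Spec_check_all_headers check_all_headers check_all_headers_alt
  rw [← loop1_eq]
  cases h1 : chaLoop1 row headers with
  | some v => rfl
  | none => exact loop2_eq row hpre headers (loop1_none_falsy h1)
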